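-- pv_equiv track=rewrite | github.com/Gosh95/algorithm | src/test/programmers/python/level2/RepeatBinaryTransformation.py | solution
-- ===== SOURCE A (Python) =====
-- def solution(s):
--     zero_count, try_count = 0, 0
--     while len(s) != 1:
--         zero_count += s.count('0')
--         s = s.replace('0', '')
--         try_count += 1
--         s = bin(len(s))[2:]
--
--     return [try_count, zero_count]
-- ===== SOURCE B (Python) =====
-- def _scan(v):
--     # one pass over the bits of v: (bit length, number of 1-bits)
--     length, ones = 0, 0
--     while v:
--         length += 1
--         ones += v & 1
--         v >>= 1
--     return length, ones
--
--
-- def _shrink(v):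
--     # recursive: (steps, zeros removed) until v's binary form is one digit
--     if v <= 1:
--         return (0, 0)
--     length, ones = _scan(v)
--     t, z = _shrink(ones)
--     return (1 + t, (length - ones) + z)
--
--
-- def solution(s):
--     if len(s) == 1:
--         return [0, 0]
--     zeros = sum(c == '0' for c in s)
--     t, z = _shrink(len(s) - zeros)
--     return [1 + t, zeros + z]
-- ===== Notes on version B (the rewrite author's own statement) =====
-- stated objective: alternative
-- what changed: B replaces A's simulation that rebuilds a binary string each round (replace/bin) with one counting pass over the input and a recursive integer decomposition whose inner loop scans bits (shift/mask) to get bit length and popcount of the surviving-ones value.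
import Mathlib
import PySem

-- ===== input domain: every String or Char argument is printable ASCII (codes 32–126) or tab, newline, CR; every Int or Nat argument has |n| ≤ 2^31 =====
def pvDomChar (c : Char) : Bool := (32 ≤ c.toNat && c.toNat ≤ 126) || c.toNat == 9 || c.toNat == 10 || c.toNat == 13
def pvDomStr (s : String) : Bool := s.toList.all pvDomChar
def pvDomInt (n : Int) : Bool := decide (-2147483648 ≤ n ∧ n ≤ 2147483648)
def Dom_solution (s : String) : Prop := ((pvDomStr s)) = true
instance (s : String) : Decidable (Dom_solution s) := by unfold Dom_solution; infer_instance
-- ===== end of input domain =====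

-- B replaces the round-by-round binary-string rebuilding with one counting pass over the
-- input and a recursive integer decomposition with a bit-scanning inner loop; objective: alternative.


-- ===== PORT A =====

-- bin(n)[2:] : binary digits of n, most significant first (empty list for n = 0)
def binDigits (v : Nat) : List Char :=
  if _h : v = 0 then []
  else binDigits (v / 2) ++ [if v % 2 = 1 then '1' else '0']
termination_by v
decreasing_by exact Nat.div_lt_self (by omega) (by norm_num)

def binChars (n : Nat) : List Char := if n = 0 then ['0'] else binDigits n

-- len(s.replace('0','')) : characters that survive removing every '0'
def onesLen (s : List Char) : Nat := (s.filter (fun c => !(c == '0'))).length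

-- equation lemmas for the well-founded definitions
theorem binDigits_zero : binDigits 0 = [] := by rw [binDigits]; rfl
theorem binDigits_step (v : Nat) (h : v ≠ 0) :
    binDigits v = binDigits (v / 2) ++ [if v % 2 = 1 then '1' else '0'] := by
  rw [binDigits, dif_neg h]
theorem onesLen_append (a b : List Char) : onesLen (a ++ b) = onesLen a + onesLen b := by
  simp [onesLen, List.filter_append]
theorem onesLen_digit (v : Nat) : onesLen [if v % 2 = 1 then '1' else '0'] = v % 2 := by
  rcases Nat.mod_two_eq_zero_or_one v with h | h <;> simp [h, onesLen]

-- facts A's termination argument cites (about A's own helpers only)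
theorem binDigits_len_le (v : Nat) : (binDigits v).length ≤ v := by
  induction v using Nat.strong_induction_on with
  | _ v ih =>
    by_cases h : v = 0
    · simp [h, binDigits_zero]
    · have := ih (v / 2) (Nat.div_lt_self (by omega) (by norm_num))
      rw [binDigits_step v h]
      simp only [List.length_append, List.length_singleton]
      omega

theorem onesLen_binDigits_le (v : Nat) : onesLen (binDigits v) ≤ v := by
  induction v using Nat.strong_induction_on with
  | _ v ih =>
    by_cases h : v = 0
    · simp [h, binDigits_zero, onesLen]
    · have := ih (v / 2) (Nat.div_lt_self (by omega) (by norm_num))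
      rw [binDigits_step v h, onesLen_append, onesLen_digit]
      omega

theorem onesLen_binDigits_lt (v : Nat) (h : 2 ≤ v) : onesLen (binDigits v) < v := by
  have h1 := onesLen_binDigits_le (v / 2)
  rw [binDigits_step v (by omega), onesLen_append, onesLen_digit]
  omega

-- A's loop termination measure
def measureA (s : List Char) : Nat :=
  if s.length = 1 then 0 else 2 * onesLen s + s.length + 2

theorem measureA_decreases (s : List Char) (h : ¬ s.length = 1) :
    measureA (binChars (onesLen s)) < measureA s := by
  have hle : onesLen s ≤ s.length := by
    simpa [onesLen] using List.length_filter_le (fun c => !(c == '0')) s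
  have hA : measureA s = 2 * onesLen s + s.length + 2 := by rw [measureA, if_neg h]
  by_cases hk : onesLen s ≤ 1
  · have h1 : (binChars (onesLen s)).length = 1 := by
      interval_cases h : onesLen s
      · simp [binChars]
      · rw [binChars, if_neg one_ne_zero, binDigits_step 1 one_ne_zero]
        simp [binDigits_zero]
    rw [measureA, if_pos h1]
    omega
  · have hk2 : 2 ≤ onesLen s := by omega
    have hC : binChars (onesLen s) = binDigits (onesLen s) := by
      rw [binChars, if_neg (by omega)]
    have hlt := onesLen_binDigits_lt _ hk2
    have hll := binDigits_len_le (onesLen s)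
    rw [hC, measureA]
    split_ifs <;> omega

-- the while loop of A, state (s, zero_count, try_count)
def loopA (s : List Char) (zc tc : Int) : List Int :=
  if s.length = 1 then [tc, zc]
  else loopA (binChars (onesLen s)) (zc + (s.count '0' : Int)) (tc + 1)
termination_by measureA s
decreasing_by exact measureA_decreases s (by assumption)

def solution (s : String) : List Int := loopA s.toList 0 0

-- ===== PORT B =====

-- the inner while loop of B: one pass over the bits of v, (bit length, ones)
def scanBits (v : Nat) : Nat × Nat :=
  if _h : v = 0 then (0, 0)
  else
    let p := scanBits (v / 2)
    (p.1 + 1, p.2 + v % 2)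
termination_by v
decreasing_by exact Nat.div_lt_self (by omega) (by norm_num)

-- facts B's termination argument cites (about B's own helper only)
theorem scanBits_zero : scanBits 0 = (0, 0) := by rw [scanBits]; rfl
theorem scanBits_step (v : Nat) (h : v ≠ 0) :
    scanBits v = ((scanBits (v / 2)).1 + 1, (scanBits (v / 2)).2 + v % 2) := by
  rw [scanBits, dif_neg h]

theorem scanBits_snd_le (v : Nat) : (scanBits v).2 ≤ v := by
  induction v using Nat.strong_induction_on with
  | _ v ih =>
    by_cases h : v = 0
    · simp [h, scanBits_zero]
    · have := ih (v / 2) (Nat.div_lt_self (by omega) (by norm_num))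
      rw [scanBits_step v h]
      omega

theorem scanBits_snd_lt (v : Nat) (h : 2 ≤ v) : (scanBits v).2 < v := by
  have := scanBits_snd_le (v / 2)
  rw [scanBits_step v (by omega)]
  omega

-- the recursive decomposition of B: (steps, zeros removed) from value v
def shrinkB (v : Nat) : Int × Int :=
  if h : v ≤ 1 then (0, 0)
  else
    let p := scanBits v
    let q := shrinkB p.2
    (1 + q.1, ((p.1 : Int) - (p.2 : Int)) + q.2)
termination_by v
decreasing_by exact scanBits_snd_lt v (by omega)

def solution_alt (s : String) : List Int :=
  let cs := s.toList
  if cs.length = 1 then [0, 0]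
  else
    let zeros := (cs.map (fun c => if c = '0' then 1 else 0)).sum
    let p := shrinkB (cs.length - zeros)
    [1 + p.1, (zeros : Int) + p.2]

-- ===== PRECONDITION & SPEC =====
def Spec_solution (s : String) (out : List Int) : Prop := out = solution_alt s
instance (s : String) (out : List Int) : Decidable (Spec_solution s out) := by unfold Spec_solution; infer_instance

-- ===== CLAIM (what is proved, stated in full; the proofs are below) =====
def Claim_equal_solution : Prop := ∀ (s : String), Dom_solution s → Spec_solution s (solution s)

-- ===== LEMMAS AND PROOFS =====

-- bridge: A's per-round string statistics are B's bit scan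
theorem len_binDigits_eq (v : Nat) : (binDigits v).length = (scanBits v).1 := by
  induction v using Nat.strong_induction_on with
  | _ v ih =>
    by_cases h : v = 0
    · simp [h, binDigits_zero, scanBits_zero]
    · have := ih (v / 2) (Nat.div_lt_self (by omega) (by norm_num))
      rw [binDigits_step v h, scanBits_step v h]
      simp only [List.length_append, List.length_singleton]
      omega

theorem ones_binDigits_eq (v : Nat) : onesLen (binDigits v) = (scanBits v).2 := by
  induction v using Nat.strong_induction_on with
  | _ v ih =>
    by_cases h : v = 0
    · simp [h, binDigits_zero, scanBits_zero, onesLen]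
    · have := ih (v / 2) (Nat.div_lt_self (by omega) (by norm_num))
      rw [binDigits_step v h, scanBits_step v h, onesLen_append, onesLen_digit]
      omega

theorem count0_digit (v : Nat) :
    ([if v % 2 = 1 then '1' else '0'] : List Char).count '0' + v % 2 = 1 := by
  rcases Nat.mod_two_eq_zero_or_one v with h | h <;> simp [h]

theorem count0_binDigits (v : Nat) :
    (binDigits v).count '0' + (scanBits v).2 = (scanBits v).1 := by
  induction v using Nat.strong_induction_on with
  | _ v ih =>
    by_cases h : v = 0
    · simp [h, binDigits_zero, scanBits_zero]
    · have := ih (v / 2) (Nat.div_lt_self (by omega) (by norm_num))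
      have h1 := count0_digit v
      rw [binDigits_step v h, scanBits_step v h, List.count_append]
      omega

theorem shrinkB_base (v : Nat) (h : v ≤ 1) : shrinkB v = (0, 0) := by
  rw [shrinkB, dif_pos h]

theorem shrinkB_step (v : Nat) (h : ¬ v ≤ 1) :
    shrinkB v = (1 + (shrinkB (scanBits v).2).1,
      (((scanBits v).1 : Int) - ((scanBits v).2 : Int)) + (shrinkB (scanBits v).2).2) := by
  rw [shrinkB, dif_neg h]

-- once A's string is a binary representation, A's loop computes B's recursion
theorem loopA_shrinkB (k : Nat) : ∀ zc tc : Int,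
    loopA (binChars k) zc tc = [tc + (shrinkB k).1, zc + (shrinkB k).2] := by
  induction k using Nat.strong_induction_on with
  | _ k ih =>
    intro zc tc
    by_cases hk : k ≤ 1
    · have h1 : (binChars k).length = 1 := by
        interval_cases k
        · simp [binChars]
        · rw [binChars, if_neg one_ne_zero, binDigits_step 1 one_ne_zero]
          simp [binDigits_zero]
      rw [loopA, if_pos h1, shrinkB_base k hk]
      norm_num
    · have hk2 : 2 ≤ k := by omega
      have hC : binChars k = binDigits k := by rw [binChars, if_neg (by omega)]
      have hfpos : 1 ≤ (scanBits k).1 := by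
        rw [scanBits_step k (by omega)]; omega
      have hlen : ¬ (binChars k).length = 1 := by
        rw [hC, len_binDigits_eq, scanBits_step k (by omega)]
        have h1 : 1 ≤ (scanBits (k / 2)).1 := by
          rw [scanBits_step (k / 2) (by omega)]; omega
        omega
      rw [loopA, if_neg hlen]
      have hones : onesLen (binChars k) = (scanBits k).2 := by
        rw [hC, ones_binDigits_eq]
      have hcnt := count0_binDigits k
      rw [hones, ih _ (scanBits_snd_lt k hk2), shrinkB_step k hk]
      have hcount : (binChars k).count '0' = (binDigits k).count '0' := by rw [hC]
      simp only [hcount]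
      simp only [List.cons.injEq, and_true]
      refine ⟨by omega, ?_⟩
      push_cast at hcnt ⊢
      omega

theorem onesLen_eq (cs : List Char) : onesLen cs + cs.count '0' = cs.length := by
  induction cs with
  | nil => simp [onesLen]
  | cons c t ih =>
    by_cases hc : c = '0' <;> simp [onesLen, hc] at ih ⊢ <;> omega

theorem zeros_sum_eq (cs : List Char) :
    (cs.map (fun c => if c = '0' then 1 else 0)).sum = cs.count '0' := by
  induction cs with
  | nil => simp
  | cons c t ih =>
    by_cases hc : c = '0' <;> simp [hc, ih]; omega

-- ===== VERDICT (by name: the statement is the Claim_ definition above) =====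
theorem solution_spec : Claim_equal_solution := by
  intro s _
  unfold Spec_solution solution solution_alt
  set cs := s.toList with hcs
  by_cases h1 : cs.length = 1
  · rw [loopA]; simp [h1]
  · rw [loopA, if_neg h1]
    simp only [if_neg h1]
    rw [loopA_shrinkB]
    have h5 := onesLen_eq cs
    have h6 := zeros_sum_eq cs
    rw [h6]
    have h8 : cs.length - cs.count '0' = onesLen cs := by omega
    rw [h8]
    norm_num
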